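-- pv_equiv track=rewrite | github.com/MrBrantCode/unitest_baseline | mut_generate/mist_train_cf/cf_44719/solution.py | canDistribute
-- ===== SOURCE A (Python) =====
-- from collections import Counter
-- from functools import lru_cache
--
-- def canDistribute(nums, quantity):
--     freq = sorted(Counter(nums).values(), reverse=True)
--     n, m = len(freq), len(quantity)
--     quantity.sort(reverse=True)
--
--     @lru_cache(None)
--     def dfs(idx: int, remain: tuple) -> bool:
--         if idx == m:
--             return True
--         for i in range(n):
--             if remain[i] >= quantity[idx]:
--                 new_remain = list(remain)
--                 new_remain[i] -= quantity[idx]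
--                 if dfs(idx + 1, tuple(sorted(new_remain, reverse=True))):
--                     return True
--                 new_remain[i] += quantity[idx]
--         return False
--
--     return dfs(0, tuple(freq))
-- ===== SOURCE B (Python) =====
-- from collections import Counter
-- from functools import lru_cache
--
-- def canDistribute(nums, quantity):
--     # Per-bucket subset search: each distinct-value frequency in turn picks the
--     # subset of the (descending-sorted) orders it serves; the enumeration prunes
--     # any take the bucket cannot afford as soon as it is attempted, and `go` is
--     # memoised on the tuple of still-unserved orders.  Return-value equivalence
--     # only: A sorts `quantity` in place, B does not mutate its arguments.
--     freqs = tuple(sorted(Counter(nums).values(), reverse=True))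
--     qs = tuple(sorted(quantity, reverse=True))
--
--     def serve(f, t):
--         # yield every tuple of orders left over after a bucket of capacity f
--         # serves some affordable subsequence of t (in sequence)
--         if not t:
--             yield t
--         else:
--             q, tail = t[0], t[1:]
--             if f >= q:
--                 yield from serve(f - q, tail)   # bucket takes q
--             for left in serve(f, tail):          # bucket skips q
--                 yield (q,) + left
--
--     @lru_cache(None)
--     def go(k, rest):
--         # can freqs[k:] serve every order in `rest`
--         if not rest:
--             return True
--         if k == len(freqs):
--             return False
--         if rest[0] > freqs[0]:
--             # the largest unserved order exceeds every capacity
--             return False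
--         return any(go(k + 1, left) for left in serve(freqs[k], rest))
--
--     return go(0, qs)
-- ===== Notes on version B (the rewrite author's own statement) =====
-- stated objective: alternative
-- what changed: A assigns orders one at a time, searching over which frequency bucket serves each order and memoising on the re-sorted tuple of remaining capacities; B goes bucket by bucket, enumerating (with pruning of unaffordable takes and an exact largest-order-fits-nowhere cutoff) the possible leftovers after each distinct-value frequency serves a subsequence of the descending-sorted orders, memoised on the tuple of still-unserved orders; A also sorts quantity in place while B mutates nothing.
import Mathlib
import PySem

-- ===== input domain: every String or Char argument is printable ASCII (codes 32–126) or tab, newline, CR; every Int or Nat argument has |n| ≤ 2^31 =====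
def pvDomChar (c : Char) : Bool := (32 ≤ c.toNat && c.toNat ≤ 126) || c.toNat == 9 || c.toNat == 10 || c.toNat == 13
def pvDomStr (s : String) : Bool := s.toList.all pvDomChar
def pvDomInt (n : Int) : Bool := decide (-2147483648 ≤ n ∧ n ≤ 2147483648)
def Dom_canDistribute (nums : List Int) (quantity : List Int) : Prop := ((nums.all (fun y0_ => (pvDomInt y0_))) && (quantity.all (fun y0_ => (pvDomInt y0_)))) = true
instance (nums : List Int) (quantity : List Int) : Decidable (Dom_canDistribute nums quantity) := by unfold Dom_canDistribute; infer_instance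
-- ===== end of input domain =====

-- B replaces A's per-order bucket search (memoised on the re-sorted remaining-capacity
-- tuple) by a per-bucket subset search over the descending-sorted orders, pruned as each
-- take is attempted and memoised on the tuple of still-unserved orders; the equivalence
-- is about the RETURN value only (A sorts `quantity` in place, B does not mutate it).

-- ===== PORT A =====
-- A's dfs (lru_cache only memoises the same pure recursion, so it is ported as the
-- plain recursion): at order index idx, try every bucket i with enough remaining
-- capacity, recursing on the re-sorted decremented capacities.
def dfsA : List Int → List Int → Bool
  | _, [] => true
  | remain, q :: rest =>
      (List.range remain.length).any (fun i =>
        decide (remain.getD i 0 ≥ q) &&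
          dfsA (PySem.List.sorted (remain.set i (remain.getD i 0 - q)) (fun x => x) true) rest)

def canDistribute (nums : List Int) (quantity : List Int) : Bool :=
  let freq := PySem.List.sorted (PySem.Dict.counter nums).values (fun x => x) true
  let qs := PySem.List.sorted quantity (fun x => x) true
  dfsA freq qs

-- ===== PORT B =====
-- B's serve: every list of orders left over after a bucket of capacity f serves some
-- affordable subsequence of t in sequence (the generator's yields, in yield order)
def serveB : Int → List Int → List (List Int)
  | _, [] => [[]]
  | f, q :: t => (if f ≥ q then serveB (f - q) t else []) ++ (serveB f t).map (fun l => q :: l)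

-- B's go (its lru_cache only memoises the same pure recursion, ported plainly):
-- empty rest succeeds, exhausted buckets fail, an unserveable largest order fails,
-- else try every leftover of the next bucket serving a subsequence
def goB : List Int → List Int → Int → Bool
  | _, [], _ => true
  | [], _ :: _, _ => false
  | fb :: fs, q :: qs, top =>
      if q > top then false
      else (serveB fb (q :: qs)).any (fun left => goB fs left top)

def canDistribute_alt (nums : List Int) (quantity : List Int) : Bool :=
  let freqs := PySem.List.sorted (PySem.Dict.counter nums).values (fun x => x) true
  let qs := PySem.List.sorted quantity (fun x => x) true
  goB freqs qs (freqs.headD 0)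

-- ===== PRECONDITION & SPEC =====
def Spec_canDistribute (nums : List Int) (quantity : List Int) (out : Bool) : Prop := out = canDistribute_alt nums quantity
instance (nums : List Int) (quantity : List Int) (out : Bool) : Decidable (Spec_canDistribute nums quantity out) := by unfold Spec_canDistribute; infer_instance

-- ===== CLAIM (what is proved, stated in full; the proofs are below) =====
def Claim_equal_canDistribute : Prop := ∀ (nums : List Int) (quantity : List Int), Dom_canDistribute nums quantity → Spec_canDistribute nums quantity (canDistribute nums quantity)

-- ===== LEMMAS AND PROOFS =====

-- The common semantics: the multiset s of remaining bucket capacities can serve the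
-- orders qs in sequence, each order taking q from some capacity v with q ≤ v.
def SatM (s : Multiset Int) : List Int → Prop
  | [] => True
  | q :: qs => ∃ v ∈ s, q ≤ v ∧ SatM ((v - q) ::ₘ s.erase v) qs

-- setting index i of a list, seen as a multiset
lemma coe_set_eq (fs : List Int) (i : Nat) (h : i < fs.length) (w : Int) :
    ((fs.set i w : List Int) : Multiset Int) = w ::ₘ (↑fs : Multiset Int).erase fs[i] := by
  induction fs generalizing i with
  | nil => simp at h
  | cons x t ih =>
    have hj : ∀ j, j + 1 < (x :: t).length → j < t.length := by intro j hh; simpa using hh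
    cases i with
    | zero => simp [List.set]
    | succ j =>
      have hjl : j < t.length := hj j h
      simp only [List.set, List.getElem_cons_succ, ← Multiset.cons_coe]
      by_cases hx : t[j] = x
      · rw [hx, Multiset.erase_cons_head, ← hx, ih j hjl, Multiset.cons_swap]
        congr 1
        exact Multiset.cons_erase (by exact_mod_cast List.getElem_mem hjl)
      · rw [Multiset.erase_cons_tail _ (fun hh => hx hh.symm), ih j hjl,
          Multiset.cons_swap]

-- A's dfs realises the sequential-serving semantics (the re-sorting of the
-- capacities only permutes them, so the multiset is unchanged)
lemma dfsA_iff (qs : List Int) : ∀ fs : List Int, dfsA fs qs = true ↔ SatM (↑fs) qs := by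
  induction qs with
  | nil => intro fs; simp [dfsA, SatM]
  | cons q qs ih =>
    intro fs
    simp only [dfsA, List.any_eq_true, List.mem_range, Bool.and_eq_true, decide_eq_true_eq]
    constructor
    · rintro ⟨i, hi, hq, hrec⟩
      rw [List.getD_eq_getElem fs 0 hi] at hq hrec
      refine ⟨fs[i], by exact_mod_cast List.getElem_mem hi, hq, ?_⟩
      have h2 := (ih _).mp hrec
      rwa [show ((PySem.List.sorted (fs.set i (fs[i] - q)) (fun x => x) true : List Int) : Multiset Int)
            = ((fs.set i (fs[i] - q) : List Int) : Multiset Int) from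
          Multiset.coe_eq_coe.mpr (PySem.List.sorted_perm _ _ _),
        coe_set_eq fs i hi] at h2
    · rintro ⟨v, hv, hq, hs⟩
      obtain ⟨i, hi, rfl⟩ := List.mem_iff_getElem.mp (by exact_mod_cast hv)
      refine ⟨i, hi, ?_, ?_⟩
      · rwa [List.getD_eq_getElem fs 0 hi]
      · rw [List.getD_eq_getElem fs 0 hi]
        apply (ih _).mpr
        rwa [show ((PySem.List.sorted (fs.set i (fs[i] - q)) (fun x => x) true : List Int) : Multiset Int)
            = ((fs.set i (fs[i] - q) : List Int) : Multiset Int) from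
          Multiset.coe_eq_coe.mpr (PySem.List.sorted_perm _ _ _),
          coe_set_eq fs i hi]

lemma mem_serveB_cons (f q : Int) (t : List Int) (left : List Int) :
    left ∈ serveB f (q :: t) ↔
      (q ≤ f ∧ left ∈ serveB (f - q) t) ∨ ∃ l ∈ serveB f t, left = q :: l := by
  by_cases h : f ≥ q
  · simp [serveB, h, eq_comm]
  · simp [serveB, h, eq_comm]

-- the heart: one bucket of capacity f serves exactly the orders missing from some
-- leftover that serveB enumerates
lemma satM_cons_iff (qs : List Int) : ∀ (f : Int) (s : Multiset Int),
    SatM (f ::ₘ s) qs ↔ ∃ left ∈ serveB f qs, SatM s left := by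
  induction qs with
  | nil => intro f s; simp [SatM, serveB]
  | cons q qs ih =>
    intro f s
    constructor
    · rintro ⟨v, hv, hq, hrec⟩
      by_cases hvf : v = f
      · subst hvf
        rw [Multiset.erase_cons_head] at hrec
        obtain ⟨l, hl, hs⟩ := (ih (v - q) s).mp hrec
        exact ⟨l, (mem_serveB_cons v q qs l).mpr (Or.inl ⟨hq, hl⟩), hs⟩
      · have hvs : v ∈ s := by
          rcases Multiset.mem_cons.mp hv with h | h
          · exact absurd h hvf
          · exact h
        rw [Multiset.erase_cons_tail _ (fun hh => hvf hh.symm), Multiset.cons_swap] at hrec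
        obtain ⟨l, hl, hs⟩ := (ih f ((v - q) ::ₘ s.erase v)).mp hrec
        exact ⟨q :: l, (mem_serveB_cons f q qs _).mpr (Or.inr ⟨l, hl, rfl⟩),
          ⟨v, hvs, hq, hs⟩⟩
    · rintro ⟨left, hm, hs⟩
      rcases (mem_serveB_cons f q qs left).mp hm with ⟨hqf, hl⟩ | ⟨l, hl, rfl⟩
      · refine ⟨f, Multiset.mem_cons_self f s, hqf, ?_⟩
        rw [Multiset.erase_cons_head]
        exact (ih (f - q) s).mpr ⟨left, hl, hs⟩
      · obtain ⟨w, hw, hqw, hs2⟩ := hs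
        refine ⟨w, Multiset.mem_cons_of_mem hw, hqw, ?_⟩
        have hIH : SatM (f ::ₘ (w - q) ::ₘ s.erase w) qs :=
          (ih f ((w - q) ::ₘ s.erase w)).mpr ⟨l, hl, hs2⟩
        by_cases hwf : w = f
        · subst hwf
          rw [Multiset.erase_cons_head]
          rw [Multiset.cons_swap, Multiset.cons_erase hw] at hIH
          exact hIH
        · rw [Multiset.erase_cons_tail _ (fun hh => hwf hh.symm), Multiset.cons_swap]
          exact hIH

-- B's go realises the same semantics, one bucket at a time (top bounds every
-- capacity, so the pruning branch is exact: SatM fails at its first step there)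
lemma goB_iff (top : Int) : ∀ fs : List Int, (∀ v ∈ fs, v ≤ top) →
    ∀ qs : List Int, goB fs qs top = true ↔ SatM (↑fs) qs := by
  intro fs
  induction fs with
  | nil => intro _ qs; cases qs <;> simp [goB, SatM]
  | cons f fs ih =>
    intro hb qs
    cases qs with
    | nil => simp [goB, SatM]
    | cons q qs =>
      by_cases htop : q > top
      · simp only [goB, if_pos htop]
        constructor
        · intro h; exact absurd h (by simp)
        · rintro ⟨v, hv, hq, -⟩
          have hvt : v ≤ top := hb v (Multiset.mem_coe.mp hv)
          omega
      · simp only [goB, if_neg htop, List.any_eq_true]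
        rw [show ((↑(f :: fs)) : Multiset Int) = f ::ₘ (↑fs : Multiset Int) from rfl,
          satM_cons_iff]
        have ih' := ih (fun v hv => hb v (List.mem_cons_of_mem _ hv))
        constructor
        · rintro ⟨l, hl, hgo⟩
          exact ⟨l, hl, (ih' l).mp hgo⟩
        · rintro ⟨l, hl, hs⟩
          exact ⟨l, hl, (ih' l).mpr hs⟩

-- ===== VERDICT (by name: the statement is the Claim_ definition above) =====
theorem canDistribute_spec : Claim_equal_canDistribute := by
  intro nums quantity _
  unfold Spec_canDistribute canDistribute canDistribute_alt
  have hb : ∀ v ∈ (PySem.List.sorted (PySem.Dict.counter nums).values (fun x => x) true),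
      v ≤ (PySem.List.sorted (PySem.Dict.counter nums).values (fun x => x) true).headD 0 := by
    cases hc : PySem.List.sorted (PySem.Dict.counter nums).values (fun x => x) true with
    | nil => intro v hv; simp at hv
    | cons m t =>
      intro v hv
      have hvv : v ∈ (PySem.Dict.counter nums).values := by
        have := PySem.List.mem_sorted (xs := (PySem.Dict.counter nums).values)
          (key := fun x => x) (rev := true) (x := v)
        rw [hc] at this
        exact this.mp hv
      simpa using PySem.List.key_head_sorted_rev_ge _ _ hc v hvv
  rw [Bool.eq_iff_iff, dfsA_iff, goB_iff _ _ hb]
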